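-- pv_equiv track=rewrite | github.com/ASSERT-KTH/DET-Gen | experiments/pynguin/c4b/return-lst/generated_tests/src_1421/5/src_1421.py | func
-- ===== SOURCE A (Python) =====
-- def func(*args):
-- 	ret_values = []
--
-- 	x = args[0]
-- 	x = ' '.join(x)
-- 	x = x.split()
-- 	y = 0
-- 	na = 8
-- 	suma = 0
-- 	mensaje = 'NO'
-- 	for s in range((len(x) - 6)):
-- 	    for m in range((s + 1), (s + 7)):
-- 	        if (x[s] != x[m]):
-- 	            break
-- 	        suma = (suma + 1)
-- 	        if (suma == 6):
-- 	            break
-- 	    if (suma == 6):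
-- 	        mensaje = 'YES'
-- 	        break
-- 	    suma = 0
-- 	ret_values.append(mensaje)
--
-- 	return ret_values
-- ===== SOURCE B (Python) =====
-- def func(*args):
--     x = args[0]
--     x = ' '.join(x)
--     x = x.split()
--     mensaje = 'NO'
--     prev = None
--     cnt = 0
--     for t in x:
--         if t == prev:
--             cnt += 1
--         else:
--             prev = t
--             cnt = 1
--         if cnt == 7:
--             mensaje = 'YES'
--             break
--     return [mensaje]
-- ===== Notes on version B (the rewrite author's own statement) =====
-- stated objective: simpler
-- what changed: The nested window scan (each start index re-compared against the next six tokens) is replaced by a single linear pass keeping the previous token and the current run length, declaring YES when the run reaches 7; the ' '.join/split preprocessing is kept verbatim.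
import Mathlib
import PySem

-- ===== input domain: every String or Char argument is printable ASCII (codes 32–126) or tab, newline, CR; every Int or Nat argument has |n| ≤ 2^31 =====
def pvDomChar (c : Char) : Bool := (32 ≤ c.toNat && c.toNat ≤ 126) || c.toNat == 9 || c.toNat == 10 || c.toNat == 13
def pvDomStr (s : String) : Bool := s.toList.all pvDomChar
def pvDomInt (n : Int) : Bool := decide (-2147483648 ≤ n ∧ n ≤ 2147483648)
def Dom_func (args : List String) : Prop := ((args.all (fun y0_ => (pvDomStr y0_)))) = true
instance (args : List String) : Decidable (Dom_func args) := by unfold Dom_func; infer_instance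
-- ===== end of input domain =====

-- B keeps A's ' '.join/split preprocessing verbatim but replaces the nested window
-- scan by one linear run-length pass; the return value is proved equal below.

-- shared preprocessing, identical in both Pythons:  x = args[0]; x = ' '.join(x); x = x.split()
def pvTok (args : List String) : List (List Char) :=
  PySem.Chars.split₀ (PySem.Chars.join [' '] (args.map String.toList))

-- ===== PORT A =====
-- inner loop: for m in range(s+1, s+7): if x[s] != x[m]: break; suma += 1; if suma == 6: break
def pvInnerA (x : List (List Char)) (s : Int) (ms : List Int) (suma : Nat) : Nat :=
  match ms with
  | [] => suma
  | m :: rest =>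
    if PySem.List.pyGetD x s [] ≠ PySem.List.pyGetD x m [] then suma
    else if suma + 1 = 6 then 6
    else pvInnerA x s rest (suma + 1)

-- outer loop: for s in range(len(x) - 6): … (suma enters every iteration reset to 0)
def pvOuterA (x : List (List Char)) (ss : List Int) : String :=
  match ss with
  | [] => "NO"
  | s :: rest =>
    if pvInnerA x s (PySem.List.pyRange (s + 1) (s + 7) 1) 0 = 6 then "YES"
    else pvOuterA x rest

def func (args : List String) : List String :=
  let x := pvTok args
  [pvOuterA x (PySem.List.pyRange 0 ((x.length : Int) - 6) 1)]

-- ===== PORT B =====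
def pvScanB (toks : List (List Char)) (prev : Option (List Char)) (cnt : Nat) : String :=
  match toks with
  | [] => "NO"
  | t :: rest =>
    let st := if some t = prev then (prev, cnt + 1) else (some t, 1)
    if st.2 = 7 then "YES" else pvScanB rest st.1 st.2

def func_alt (args : List String) : List String :=
  [pvScanB (pvTok args) none 0]

-- ===== PRECONDITION & SPEC =====
def Spec_func (args : List String) (out : List String) : Prop := out = func_alt args
instance (args : List String) (out : List String) : Decidable (Spec_func args out) := by unfold Spec_func; infer_instance

-- ===== CLAIM (what is proved, stated in full; the proofs are below) =====
def Claim_equal_func : Prop := ∀ (args : List String), Dom_func args → Spec_func args (func args)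

-- ===== LEMMAS AND PROOFS =====

-- reference predicate: some window of 7 consecutive equal tokens exists
def pvHasSeven : List (List Char) → Bool
  | [] => false
  | a :: t => (decide (6 ≤ (t.takeWhile (fun c => c = a)).length)) || pvHasSeven t

-- pure counting core of A's inner loop over the fetched window elements
def pvCountRun (a : List Char) (l : List (List Char)) (suma : Nat) : Nat :=
  match l with
  | [] => suma
  | b :: r =>
    if a ≠ b then suma
    else if suma + 1 = 6 then 6
    else pvCountRun a r (suma + 1)

theorem pvInnerA_eq_countRun (x : List (List Char)) (s : Int) (ms : List Int) (suma : Nat) :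
    pvInnerA x s ms suma
      = pvCountRun (PySem.List.pyGetD x s []) (ms.map (fun m => PySem.List.pyGetD x m [])) suma := by
  induction ms generalizing suma with
  | nil => rfl
  | cons m rest ih => simp [pvInnerA, pvCountRun, ih]

theorem pvCountRun_eq_min (a : List Char) (l : List (List Char)) (suma : Nat) (h : suma ≤ 5) :
    pvCountRun a l suma = min 6 (suma + (l.takeWhile (fun c => c = a)).length) := by
  induction l generalizing suma with
  | nil => simp [pvCountRun]; omega
  | cons b r ih =>
    by_cases hb : a = b
    · subst hb
      rw [show List.takeWhile (fun c => decide (c = a)) (a :: r)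
            = a :: List.takeWhile (fun c => decide (c = a)) r by simp]
      by_cases h6 : suma + 1 = 6
      · rw [show pvCountRun a (a :: r) suma = 6 by simp [pvCountRun, h6]]
        simp only [List.length_cons]
        omega
      · rw [show pvCountRun a (a :: r) suma = pvCountRun a r (suma + 1) by
              simp [pvCountRun, h6]]
        rw [ih (suma + 1) (by omega)]
        simp only [List.length_cons]
        omega
    · rw [show pvCountRun a (b :: r) suma = suma by simp [pvCountRun, hb]]
      rw [show List.takeWhile (fun c => decide (c = a)) (b :: r) = [] by
            simp; exact fun e => hb e.symm]
      simp only [List.length_nil, Nat.add_zero]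
      omega

theorem pvTakeWhile_take {α : Type} (p : α → Bool) (n : Nat) (l : List α) :
    ((l.take n).takeWhile p).length = min n (l.takeWhile p).length := by
  induction n generalizing l with
  | zero => simp
  | succ n ih =>
    cases l with
    | nil => simp
    | cons b r =>
      by_cases hb : p b
      · simp only [List.take_succ_cons, List.takeWhile_cons, hb, if_true, List.length_cons, ih r]
        omega
      · simp [hb]

theorem pvHasSeven_short (l : List (List Char)) (h : l.length < 7) : pvHasSeven l = false := by
  induction l with
  | nil => rfl
  | cons a t ih =>
    have h1 : (t.takeWhile (fun c => c = a)).length ≤ t.length :=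
      (List.takeWhile_prefix _).length_le
    simp only [List.length_cons] at h
    simp only [pvHasSeven, ih (by omega), Bool.or_false, decide_eq_false_iff_not]
    omega

theorem pvOuterA_eq (x : List (List Char)) (n : Nat) : ∀ (k : Nat), x.length ≤ k + n →
    pvOuterA x (PySem.List.pyRange (k : Int) ((x.length : Int) - 6) 1)
      = (if pvHasSeven (x.drop k) then "YES" else "NO") := by
  induction n with
  | zero =>
    intro k hn
    rw [PySem.List.pyRange_one_eq_nil (by omega)]
    rw [List.drop_of_length_le (by omega)]
    rfl
  | succ n ih =>
    intro k hn
    by_cases h7 : k + 7 ≤ x.length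
    · have hk : k < x.length := by omega
      rw [PySem.List.pyRange_one_cons (a := (k : Int)) (by omega)]
      simp only [pvOuterA]
      rw [pvInnerA_eq_countRun]
      -- the window of fetched elements is (x.drop (k+1)).take 6
      have hsplit := PySem.List.pyRange_one_append ((k : Int) + 1) ((k : Int) + 7)
        ((x.length : Int)) (by omega) (by omega)
      have hfull := PySem.List.map_pyGetD_pyRange' x ([] : List Char)
        (a := (k : Int) + 1) (by omega)
      rw [hsplit, List.map_append] at hfull
      have hlen : ((PySem.List.pyRange ((k : Int) + 1) ((k : Int) + 7)).map
          (fun m => PySem.List.pyGetD x m [])).length = 6 := by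
        simp [PySem.List.length_pyRange_one]
      have htoNat : ((k : Int) + 1).toNat = k + 1 := by omega
      have hmap : (PySem.List.pyRange ((k : Int) + 1) ((k : Int) + 7)).map
          (fun m => PySem.List.pyGetD x m []) = (x.drop (k + 1)).take 6 := by
        rw [htoNat] at hfull
        rw [← hfull, ← hlen, List.take_left]
      rw [hmap]
      rw [PySem.List.pyGetD_eq_getElem x ([] : List Char) (by omega) (by omega)]
      have hidx : ((k : Int)).toNat = k := by omega
      rw [pvCountRun_eq_min _ _ 0 (by omega)]
      rw [List.drop_eq_getElem_cons hk]
      simp only [pvHasSeven, hidx]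
      have htw := pvTakeWhile_take (fun c => decide (c = x[k])) 6 (x.drop (k + 1))
      by_cases hY : 6 ≤ ((x.drop (k + 1)).takeWhile (fun c => c = x[k])).length
      · rw [if_pos (by rw [htw]; omega)]
        simp [hY]
      · rw [if_neg (by rw [htw]; omega)]
        have := ih (k + 1) (by omega)
        rw [show ((k : Int) + 1) = (((k + 1 : Nat)) : Int) by push_cast; ring]
        rw [this]
        simp [hY]
    · rw [PySem.List.pyRange_one_eq_nil (by omega)]
      rw [pvHasSeven_short (x.drop k) (by simp; omega)]
      rfl

theorem pvIfEq (b1 b2 : Bool) (h : b1 = true ↔ b2 = true) :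
    (if b1 then "YES" else "NO") = (if b2 then "YES" else "NO") := by
  cases b1 <;> cases b2 <;> simp_all

theorem pvScanB_some (l : List (List Char)) : ∀ (a : List Char) (cnt : Nat),
    1 ≤ cnt → cnt ≤ 6 →
    pvScanB l (some a) cnt
      = (if (decide (7 - cnt ≤ (l.takeWhile (fun c => c = a)).length) || pvHasSeven l)
         then "YES" else "NO") := by
  induction l with
  | nil =>
    intro a cnt h1 h2
    rw [show pvScanB [] (some a) cnt = "NO" from rfl]
    rw [if_neg (by simp [pvHasSeven]; omega)]
  | cons c r ih =>
    intro a cnt h1 h2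
    by_cases hc : c = a
    · subst hc
      by_cases h7 : cnt + 1 = 7
      · rw [show pvScanB (c :: r) (some c) cnt = "YES" by simp [pvScanB, h7]]
        rw [if_pos]
        simp
        omega
      · rw [show pvScanB (c :: r) (some c) cnt = pvScanB r (some c) (cnt + 1) by
              simp [pvScanB, h7]]
        rw [ih c (cnt + 1) (by omega) (by omega)]
        apply pvIfEq
        simp only [List.takeWhile_cons, decide_true, if_true, List.length_cons, pvHasSeven]
        cases hr : pvHasSeven r <;> simp <;> omega
    · rw [show pvScanB (c :: r) (some a) cnt = pvScanB r (some c) 1 by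
            simp [pvScanB, hc]]
      rw [ih c 1 (by omega) (by omega)]
      have ht : List.takeWhile (fun b => decide (b = a)) (c :: r) = [] := by
        simp [hc]
      rw [ht]
      apply pvIfEq
      simp only [pvHasSeven, List.length_nil]
      cases hr : pvHasSeven r <;> simp <;> omega

theorem pvScanB_none (l : List (List Char)) :
    pvScanB l none 0 = (if pvHasSeven l then "YES" else "NO") := by
  cases l with
  | nil => rfl
  | cons b r =>
    rw [show pvScanB (b :: r) none 0 = pvScanB r (some b) 1 by simp [pvScanB]]
    rw [pvScanB_some r b 1 (by omega) (by omega)]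
    simp [pvHasSeven]

-- ===== VERDICT (by name: the statement is the Claim_ definition above) =====
theorem func_spec : Claim_equal_func := by
  intro args _
  unfold Spec_func func func_alt
  show [pvOuterA (pvTok args) (PySem.List.pyRange 0 (((pvTok args).length : Int) - 6) 1)]
      = [pvScanB (pvTok args) none 0]
  have h := pvOuterA_eq (pvTok args) (pvTok args).length 0 (by omega)
  simp only [Nat.cast_zero, List.drop_zero] at h
  rw [pvScanB_none, h]
  rfl
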